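-- pv_equiv track=rewrite | github.com/Durdona-diligent/assignments | week6assignment.py | get_regional_sales_total
-- ===== SOURCE A (Python) =====
-- def get_regional_sales_total(sales_data):
--     regions = []
--     for employee in sales_data:
--         region = employee[1]
--         if region not in regions:
--             regions.append(region)
--
--     regional_totals = []
--     for region in regions:
--         total_sales = 0
--         for employee in sales_data:
--             if employee[1] == region:
--                 sales_list = employee[2]
--                 for sale in sales_list:
--                     total_sales += sale
--         regional_totals.append((region, total_sales))
--     regional_totals.sort()
--     return regional_totals
-- ===== SOURCE B (Python) =====
-- def get_regional_sales_total(sales_data):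
--     totals = {}
--     for employee in sales_data:
--         region = employee[1]
--         totals[region] = totals.get(region, 0) + sum(employee[2])
--     return sorted(totals.items())
-- ===== Notes on version B (the rewrite author's own statement) =====
-- stated objective: idiomatic
-- what changed: Replaces A's dedup-regions pass plus one full rescan of the data per region with a single pass that accumulates per-region totals in a dict, then sorts the items once.
import Mathlib
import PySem

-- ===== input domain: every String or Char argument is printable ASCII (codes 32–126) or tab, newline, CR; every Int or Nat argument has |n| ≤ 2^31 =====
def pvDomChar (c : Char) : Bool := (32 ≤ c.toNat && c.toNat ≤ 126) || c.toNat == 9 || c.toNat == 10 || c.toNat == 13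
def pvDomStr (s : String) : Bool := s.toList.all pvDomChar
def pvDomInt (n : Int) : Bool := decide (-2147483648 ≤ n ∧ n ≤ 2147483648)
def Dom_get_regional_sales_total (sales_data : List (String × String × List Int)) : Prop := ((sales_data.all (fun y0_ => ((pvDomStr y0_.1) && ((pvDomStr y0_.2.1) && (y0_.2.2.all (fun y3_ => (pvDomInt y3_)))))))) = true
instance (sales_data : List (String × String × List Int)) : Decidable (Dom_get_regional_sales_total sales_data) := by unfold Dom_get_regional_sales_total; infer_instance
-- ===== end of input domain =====

-- B replaces A's dedup pass plus one full rescan of the data per region with a single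
-- dict-accumulation pass followed by one sort of the items (idiomatic, fewer passes).

-- ===== PORT A =====
def get_regional_sales_total (sales_data : List (String × String × List Int)) : List (String × Int) :=
  let regions := sales_data.foldl
    (fun acc employee => if acc.contains employee.2.1 then acc else acc ++ [employee.2.1])
    ([] : List String)
  let regional_totals := regions.foldl
    (fun acc region =>
      acc ++ [(region,
        sales_data.foldl
          (fun total_sales employee =>
            if employee.2.1 == region then
              employee.2.2.foldl (fun t sale => t + sale) total_sales
            else total_sales)
          (0 : Int))])
    ([] : List (String × Int))
  PySem.List.sorted2 regional_totals (fun p => p.1) (fun p => p.2)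

-- ===== PORT B =====
def get_regional_sales_total_alt (sales_data : List (String × String × List Int)) : List (String × Int) :=
  let totals := sales_data.foldl
    (fun d employee => d.insert employee.2.1 (d.getD employee.2.1 0 + employee.2.2.sum))
    (PySem.Dict.empty : PySem.Dict String Int)
  PySem.List.sorted2 totals.items (fun p => p.1) (fun p => p.2)

-- ===== PRECONDITION & SPEC =====
def Spec_get_regional_sales_total (sales_data : List (String × String × List Int)) (out : List (String × Int)) : Prop := out = get_regional_sales_total_alt sales_data
instance (sales_data : List (String × String × List Int)) (out : List (String × Int)) : Decidable (Spec_get_regional_sales_total sales_data out) := by unfold Spec_get_regional_sales_total; infer_instance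

-- ===== CLAIM (what is proved, stated in full; the proofs are below) =====
def Claim_equal_get_regional_sales_total : Prop := ∀ (sales_data : List (String × String × List Int)), Dom_get_regional_sales_total sales_data → Spec_get_regional_sales_total sales_data (get_regional_sales_total sales_data)

-- ===== LEMMAS AND PROOFS =====

-- per-region total of the whole data set
def pvTot (sales_data : List (String × String × List Int)) (r : String) : Int :=
  ((sales_data.filter (fun e => e.2.1 == r)).map (fun e => e.2.2.sum)).sum

-- the dict fold's lookup is the per-region total
theorem pv_getD_fold (sales_data : List (String × String × List Int))
    (d : PySem.Dict String Int) (r : String) :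
    (sales_data.foldl
      (fun d employee => d.insert employee.2.1 (d.getD employee.2.1 0 + employee.2.2.sum)) d).getD r 0
      = d.getD r 0 + pvTot sales_data r := by
  induction sales_data generalizing d with
  | nil => simp [pvTot]
  | cons e t ih =>
      simp only [List.foldl_cons, ih, pvTot, List.filter_cons]
      by_cases h : e.2.1 = r
      · simp [h, PySem.Dict.getD_insert_self]
        ring
      · have hb : (e.2.1 == r) = false := by simp [h]
        simp [hb, PySem.Dict.getD_insert_of_ne _ _ _ (Ne.symm h)]

theorem get_regional_sales_total_eq (sales_data : List (String × String × List Int)) :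
    get_regional_sales_total sales_data = get_regional_sales_total_alt sales_data := by
  simp only [get_regional_sales_total, get_regional_sales_total_alt]
  have hkeys : (sales_data.foldl
      (fun d employee => d.insert employee.2.1 (d.getD employee.2.1 0 + employee.2.2.sum))
      (PySem.Dict.empty : PySem.Dict String Int)).keys
      = PySem.Set.update (PySem.Dict.empty : PySem.Dict String Int).keys
          (sales_data.map (fun e => e.2.1)) :=
    PySem.Dict.keys_foldl_insert_key sales_data (fun e => e.2.1)
      (fun d e => d.getD e.2.1 0 + e.2.2.sum) PySem.Dict.empty
  have hnd : (sales_data.foldl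
      (fun d employee => d.insert employee.2.1 (d.getD employee.2.1 0 + employee.2.2.sum))
      (PySem.Dict.empty : PySem.Dict String Int)).keys.Nodup :=
    PySem.Dict.nodup_keys_foldl_insert_key sales_data (fun e => e.2.1)
      (fun d e => d.getD e.2.1 0 + e.2.2.sum) PySem.Dict.empty PySem.Dict.nodup_keys_empty
  rw [PySem.Dict.items_eq_map_keys _ hnd 0, hkeys]
  have hupd : PySem.Set.update (PySem.Dict.empty : PySem.Dict String Int).keys
      (sales_data.map (fun e => e.2.1))
      = PySem.Set.ofList (sales_data.map (fun e => e.2.1)) := by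
    simp [PySem.Set.update, PySem.Set.ofList_eq_foldl, PySem.Dict.keys_empty]
  rw [hupd]
  -- A's regions list is the same ordered dedup
  have hregions : sales_data.foldl
      (fun acc employee => if acc.contains employee.2.1 then acc else acc ++ [employee.2.1])
      ([] : List String)
      = PySem.Set.ofList (sales_data.map (fun e => e.2.1)) := by
    rw [PySem.Set.ofList_eq_foldl, List.foldl_map]
    rfl
  rw [hregions]
  -- A's middle fold is an append-map; its inner fold computes pvTot
  rw [PySem.List.foldl_append_singleton_eq_map]
  simp only [List.nil_append]
  congr 1
  apply List.map_congr_left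
  intro r _hr
  dsimp only
  congr 1
  rw [pv_getD_fold, PySem.Dict.getD_empty, zero_add]
  have hinner : ∀ (l : List (String × String × List Int)) (a : Int),
      l.foldl (fun total_sales employee =>
        if employee.2.1 == r then employee.2.2.foldl (fun t sale => t + sale) total_sales
        else total_sales) a = a + pvTot l r := by
    intro l
    induction l with
    | nil => intro a; simp [pvTot]
    | cons e t ih =>
        intro a
        rw [List.foldl_cons]
        by_cases h : (e.2.1 == r) = true
        · rw [if_pos h]
          have hsum : e.2.2.foldl (fun t sale => t + sale) a = a + e.2.2.sum := by
            have := PySem.List.foldl_add e.2.2 (fun x => x) a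
            simpa using this
          rw [hsum, ih]
          simp only [pvTot, List.filter_cons, h, if_pos, List.map_cons, List.sum_cons]
          ring
        · rw [if_neg h, ih]
          simp only [pvTot, List.filter_cons, h, Bool.false_eq_true, ite_false]
  rw [hinner, zero_add]

-- ===== VERDICT (by name: the statement is the Claim_ definition above) =====
theorem get_regional_sales_total_spec : Claim_equal_get_regional_sales_total := by
  intro sales_data _
  unfold Spec_get_regional_sales_total
  exact get_regional_sales_total_eq sales_data
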